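-- pv_equiv track=rewrite | github.com/marcin119a/labs_bioinformatics_ads | laby13/ex1.py | find_prefix_matches
-- ===== SOURCE A (Python) =====
-- def find_prefix_matches(pattern, text):
--     results = []
--     for i in range(len(text)):
--         matches = []
--         # Sprawdzamy dopasowania od najdłuższego możliwego prefixu do najkrótszego
--         max_k = min(len(pattern), i + 1)
--         for k in range(1, max_k + 1):
--             if pattern[:k] == text[i-k+1:i+1]:
--                 matches.append(k)
--         results.append((i, matches))
--     return results
-- ===== SOURCE B (Python) =====
-- def find_prefix_matches(pattern, text):
--     n, m = len(text), len(pattern)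
--
--     def lcp_from(j):
--         # longest common prefix of pattern and text[j:], char by char
--         l = 0
--         while l < m and j + l < n and pattern[l] == text[j + l]:
--             l += 1
--         return l
--
--     lcp = [lcp_from(j) for j in range(n)]
--     # a length-k prefix match ends at i iff it starts at j = i-k+1 with lcp[j] >= k
--     return [(i, [k for k in range(1, min(m, i + 1) + 1) if lcp[i + 1 - k] >= k])
--             for i in range(n)]
-- ===== Notes on version B (the rewrite author's own statement) =====
-- stated objective: alternative
-- what changed: B precomputes, for each start position, the longest common prefix of pattern and text[j:] in one char-by-char pass, then each per-position match list is read off by an arithmetic lookup (lcp[i+1-k] >= k) instead of A's per-k slice comparisons; fewer character comparisons (O(n*m) vs O(n*m^2)) though the output itself can be of size n*m.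
import Mathlib
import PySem

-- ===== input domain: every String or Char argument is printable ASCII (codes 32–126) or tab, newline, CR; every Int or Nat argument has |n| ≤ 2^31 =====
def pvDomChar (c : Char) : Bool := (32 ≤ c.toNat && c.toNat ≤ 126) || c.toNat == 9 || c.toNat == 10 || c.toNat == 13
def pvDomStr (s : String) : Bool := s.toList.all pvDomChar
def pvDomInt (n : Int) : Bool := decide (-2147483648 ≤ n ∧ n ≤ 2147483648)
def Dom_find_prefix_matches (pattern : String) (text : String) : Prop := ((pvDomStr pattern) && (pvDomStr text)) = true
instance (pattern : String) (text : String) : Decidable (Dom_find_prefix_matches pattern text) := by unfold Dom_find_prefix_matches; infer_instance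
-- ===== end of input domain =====

-- B replaces A's per-k slice comparisons by a precomputed per-start longest-common-prefix table (arithmetic lookup per k); return values proved equal on all inputs.

-- ===== PORT A =====
def find_prefix_matches (pattern : String) (text : String) : List (Int × List Int) :=
  let p := pattern.toList
  let t := text.toList
  (PySem.List.pyRange 0 (PySem.List.len t) 1).foldl (fun results i =>
    let max_k : Int := min (PySem.List.len p) (i + 1)
    let matchList := (PySem.List.pyRange 1 (max_k + 1) 1).foldl (fun ms k =>
      if PySem.List.slice p none (some k) = PySem.List.slice t (some (i - k + 1)) (some (i + 1))
      then ms ++ [k] else ms) []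
    results ++ [(i, matchList)]) []

-- ===== PORT B =====
-- while loop of lcp_from: char-by-char common prefix of pattern and text[j:]
-- (the bounds l < m and j + l < n are exactly the two lists being nonempty)
def pvLcp (p t : List Char) : Nat :=
  match p, t with
  | a :: p', b :: t' => if a = b then pvLcp p' t' + 1 else 0
  | _, _ => 0

def find_prefix_matches_alt (pattern : String) (text : String) : List (Int × List Int) :=
  let p := pattern.toList
  let t := text.toList
  let n := t.length
  let m := p.length
  let lcp : List Nat := (List.range n).map (fun j => pvLcp p (t.drop j))
  (List.range n).map (fun (i : Nat) =>
    ((i : Int),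
      ((List.range' 1 (min m (i + 1))).filter
        (fun k => decide (k ≤ lcp.getD (i + 1 - k) 0))).map (fun k => Int.ofNat k)))

-- ===== PRECONDITION & SPEC =====
def Spec_find_prefix_matches (pattern : String) (text : String) (out : List (Int × List Int)) : Prop := out = find_prefix_matches_alt pattern text
instance (pattern : String) (text : String) (out : List (Int × List Int)) : Decidable (Spec_find_prefix_matches pattern text out) := by unfold Spec_find_prefix_matches; infer_instance

-- ===== CLAIM (what is proved, stated in full; the proofs are below) =====
def Claim_equal_find_prefix_matches : Prop := ∀ (pattern : String) (text : String), Dom_find_prefix_matches pattern text → Spec_find_prefix_matches pattern text (find_prefix_matches pattern text)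

-- ===== LEMMAS AND PROOFS =====

theorem pvLcp_take_iff (a b : List Char) (k : Nat) (ha : k ≤ a.length) (hb : k ≤ b.length) :
    a.take k = b.take k ↔ k ≤ pvLcp a b := by
  induction k generalizing a b with
  | zero => simp
  | succ k ih =>
    match a, b with
    | x :: a', y :: b' =>
      by_cases hxy : x = y
      · subst hxy
        rw [pvLcp, if_pos rfl]
        simp only [List.take_succ_cons, List.cons.injEq, true_and]
        rw [ih a' b' (by simpa using ha) (by simpa using hb)]
        omega
      · rw [pvLcp, if_neg hxy]
        simp [hxy]

theorem pv_key (p t : List Char) (i k : Nat) (hi : i < t.length)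
    (hk1 : 1 ≤ k) (hkm : k ≤ p.length) (hki : k ≤ i + 1) :
    (PySem.List.slice p none (some (k : Int))
      = PySem.List.slice t (some ((i : Int) - k + 1)) (some ((i : Int) + 1)))
    ↔ k ≤ pvLcp p (t.drop (i + 1 - k)) := by
  have h1 : ((i : Int) - k + 1) = ((i + 1 - k : Nat) : Int) := by push_cast [Nat.cast_sub hki]; ring
  have h2 : ((i : Int) + 1) = ((i + 1 : Nat) : Int) := by push_cast; ring
  rw [PySem.List.slice_to_natCast, h1, h2, PySem.List.slice_natCast]
  have h3 : i + 1 - (i + 1 - k) = k := by omega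
  rw [h3]
  exact pvLcp_take_iff p (t.drop (i + 1 - k)) k hkm (by simp [List.length_drop]; omega)

theorem pv_getD_map_range {α : Type} (f : Nat → α) (n j : Nat) (d : α) (hj : j < n) :
    (((List.range n).map f).getD j d) = f j := by
  simp [List.getD_eq_getElem?_getD, List.getElem?_map, List.getElem?_range hj]

theorem find_prefix_matches_spec : Claim_equal_find_prefix_matches := by
  intro pattern text _
  unfold Spec_find_prefix_matches find_prefix_matches find_prefix_matches_alt
  simp only [PySem.List.len_eq]
  set p := pattern.toList with hp
  set t := text.toList with ht
  rw [PySem.List.pyRange_zero_nat, PySem.List.foldl_append_singleton_eq_map, List.nil_append,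
      List.map_map]
  apply List.map_congr_left
  intro i hi
  rw [List.mem_range] at hi
  simp only [Function.comp]
  refine Prod.ext rfl ?_
  -- inner loops
  rw [PySem.List.foldl_append_ite_eq_filter
        (fun k => PySem.List.slice p none (some k)
          = PySem.List.slice t (some ((i : Int) - k + 1)) (some ((i : Int) + 1))),
      List.nil_append]
  have hmin : ((min (p.length : Int) ((i : Int) + 1) + 1 - 1)).toNat = min p.length (i + 1) := by
    omega
  rw [PySem.List.pyRange_one 1, hmin, List.filter_map, List.range'_eq_map_range, List.filter_map,
      List.map_map]
  dsimp only
  have hfil : ∀ k ∈ List.range (min p.length (i + 1)),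
      ((fun j : Int => decide (PySem.List.slice p none (some j)
          = PySem.List.slice t (some ((i : Int) - j + 1)) (some ((i : Int) + 1))))
        ∘ fun k : Nat => (1 : Int) + (k : Int)) k
      = ((fun j : Nat =>
            decide (j ≤ (((List.range t.length).map (fun j => pvLcp p (t.drop j))).getD (i + 1 - j) 0)))
        ∘ fun x : Nat => 1 + x) k := by
    intro k hk
    rw [List.mem_range] at hk
    simp only [Function.comp]
    have hlt : i + 1 - (1 + k) < t.length := by omega
    rw [pv_getD_map_range (fun j => pvLcp p (t.drop j)) t.length (i + 1 - (1 + k)) 0 hlt]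
    have : ((1 : Int) + (k : Int)) = (((1 + k : Nat) : Nat) : Int) := by push_cast; ring
    rw [decide_eq_decide, this]
    exact pv_key p t i (1 + k) hi (by omega) (by omega) (by omega)
  rw [List.filter_congr hfil]
  apply List.map_congr_left
  intro k _
  simp only [Function.comp, Int.ofNat_eq_natCast]
  push_cast
  ring
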